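-- pv_equiv track=rewrite | github.com/TSTanabe/HAMSTER | scripts/Csb_cluster.py | csb_collapse_to_longest_pattern
-- ===== SOURCE A (Python) =====
-- from typing import Dict, List, Set, Tuple, Any
--
-- def csb_collapse_to_longest_pattern(input_dict: Dict[Any, Set[Any]]) -> Dict[Any, Set[Any]]:
--     """
--     For CSBs mapping to same gene sets, keep only the longest pattern key.
--
--     Args:
--         input_dict: dict of pattern -> set(gene clusters)
--
--     Returns:
--         dict: longest pattern for each value -> set(gene clusters)
--     """
--     # Step 1: Convert set values to sorted tuples (to make them hashable)
--     processed_dict = {key: tuple(sorted(value)) for key, value in input_dict.items()}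
--
--     # Step 2: Group keys by their values
--     value_to_keys = {}
--     for key, value in processed_dict.items():
--         if value in value_to_keys:
--             value_to_keys[value].append(key)
--         else:
--             value_to_keys[value] = [key]
--
--     # Step 3: Select the longest key for each value
--     filtered_dict = {}
--     for value, keys in value_to_keys.items():
--         # Find the longest key by tuple length
--         longest_key = max(keys, key=len)
--         filtered_dict[longest_key] = set(value)  # Convert back to set for output consistency
--
--     return filtered_dict
-- ===== SOURCE B (Python) =====
-- def csb_collapse_to_longest_pattern(input_dict):
--     """Group extraction without a grouping table: peel off the first item's whole
--     gene-set group, pick its longest key by a linear scan, repeat on the rest."""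
--     def collapse(items):
--         out = []
--         while items:
--             (key, sig), rest = items[0], items[1:]
--             best = key
--             for k, s in rest:
--                 if s == sig and len(k) > len(best):
--                     best = k
--             out.append((best, sig))
--             items = [(k, s) for k, s in rest if s != sig]
--         return out
--
--     items = [(key, tuple(sorted(value))) for key, value in input_dict.items()]
--     return {key: set(sig) for key, sig in collapse(items)}
-- ===== Notes on version B (the rewrite author's own statement) =====
-- stated objective: alternative
-- what changed: A builds a hash table grouping every key per sorted-value signature and then takes max(keys, key=len) per group; B uses no grouping table at all: it repeatedly peels off the first remaining item's whole signature group, scans the rest once for the longest key sharing that signature, emits that pair, and continues on the items whose signature differs (first-occurrence order and strict-> tie-breaking fall out naturally); …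
import Mathlib
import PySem

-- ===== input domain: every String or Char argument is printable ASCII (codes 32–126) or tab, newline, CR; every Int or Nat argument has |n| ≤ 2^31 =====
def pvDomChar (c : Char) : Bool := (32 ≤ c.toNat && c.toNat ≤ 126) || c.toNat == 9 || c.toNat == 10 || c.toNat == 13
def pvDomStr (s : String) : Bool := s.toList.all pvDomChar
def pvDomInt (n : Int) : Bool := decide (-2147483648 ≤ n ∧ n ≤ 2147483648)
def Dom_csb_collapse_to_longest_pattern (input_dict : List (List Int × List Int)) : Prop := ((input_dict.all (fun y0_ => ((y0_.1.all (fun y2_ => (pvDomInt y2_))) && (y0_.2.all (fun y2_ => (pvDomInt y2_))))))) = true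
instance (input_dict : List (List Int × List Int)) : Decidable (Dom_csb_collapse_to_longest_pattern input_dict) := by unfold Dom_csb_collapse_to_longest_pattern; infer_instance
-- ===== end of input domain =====

-- B replaces A's hash-table grouping (dict of key lists per signature, then per-group max) by a partition
-- with no grouping table: peel off the first item's whole signature group, scan the rest once for its
-- longest key, continue on the items with a different signature; objective: alternative (similar cost).

-- ===== PORT A =====
def csb_collapse_to_longest_pattern (input_dict : List (List Int × List Int)) : List (List Int × List Int) :=
  -- Step 1: processed_dict = {key: tuple(sorted(value)) …}
  let processed : PySem.Dict (List Int) (List Int) :=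
    input_dict.foldl (fun d kv => d.insert kv.1 (PySem.List.sorted kv.2 (fun x => x) false)) PySem.Dict.empty
  -- Step 2: group keys by their values
  let value_to_keys : PySem.Dict (List Int) (List (List Int)) :=
    processed.items.foldl
      (fun d kv =>
        if d.contains kv.2 then d.modify kv.2 [] (fun ks => ks ++ [kv.1])
        else d.insert kv.2 [kv.1])
      PySem.Dict.empty
  -- Step 3: longest_key = max(keys, key=len); the `none` branch is unreachable (every group is nonempty;
  -- Python's max would raise only on an empty group, which never occurs)
  let filtered : PySem.Dict (List Int) (List Int) :=
    value_to_keys.items.foldl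
      (fun f vks =>
        match PySem.List.max? vks.2 (fun k => k.length) with
        | some longest => f.insert longest vks.1
        | none => f)
      PySem.Dict.empty
  filtered.items

-- ===== PORT B =====
-- collapse(items): take the first item, scan the rest for the longest key with the same signature,
-- recurse on the items whose signature differs
def pvCollapseRec : List (List Int × List Int) → List (List Int × List Int)
  | [] => []
  | (key, sig) :: rest =>
      let best := rest.foldl (fun b p => if p.2 == sig && b.length < p.1.length then p.1 else b) key
      (best, sig) :: pvCollapseRec (rest.filter (fun p => p.2 != sig))
  termination_by l => l.length
  decreasing_by
    simpa using Nat.lt_succ_of_le (le_trans (List.length_filter_le _ _) (le_of_eq List.length_attach))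

def csb_collapse_to_longest_pattern_alt (input_dict : List (List Int × List Int)) : List (List Int × List Int) :=
  let items := input_dict.map (fun kv => (kv.1, PySem.List.sorted kv.2 (fun x => x) false))
  (((pvCollapseRec items).foldl (fun d p => d.insert p.1 p.2)
      (PySem.Dict.empty : PySem.Dict (List Int) (List Int)))).items

-- ===== PRECONDITION & SPEC =====
-- Pre_ excludes only association lists that are not the image of a Python input (a dict of SETS): duplicate
-- pattern keys or duplicate elements inside a value list have no Python counterpart under the type convention
-- (a Python dict cannot hold a key twice, a set cannot hold an element twice); every actual Python input is
-- represented inside Pre_.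
def Pre_csb_collapse_to_longest_pattern (input_dict : List (List Int × List Int)) : Prop :=
  (input_dict.map Prod.fst).Nodup ∧ ∀ p ∈ input_dict, p.2.Nodup
instance (input_dict : List (List Int × List Int)) : Decidable (Pre_csb_collapse_to_longest_pattern input_dict) := by unfold Pre_csb_collapse_to_longest_pattern; infer_instance
def pvWitness_csb_collapse_to_longest_pattern : (List (List Int × List Int)) :=
  [([1, 2], [5, 3]), ([7], [3, 5]), ([4], [6])]

def Spec_csb_collapse_to_longest_pattern (input_dict : List (List Int × List Int)) (out : List (List Int × List Int)) : Prop := out = csb_collapse_to_longest_pattern_alt input_dict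
instance (input_dict : List (List Int × List Int)) (out : List (List Int × List Int)) : Decidable (Spec_csb_collapse_to_longest_pattern input_dict out) := by unfold Spec_csb_collapse_to_longest_pattern; infer_instance

-- ===== CLAIM (what is proved, stated in full; the proofs are below) =====
def Claim_equal_csb_collapse_to_longest_pattern : Prop := ∀ (input_dict : List (List Int × List Int)), Dom_csb_collapse_to_longest_pattern input_dict → Pre_csb_collapse_to_longest_pattern input_dict → Spec_csb_collapse_to_longest_pattern input_dict (csb_collapse_to_longest_pattern input_dict)

-- ===== LEMMAS AND PROOFS =====

-- the reference partition both ports are reduced to: the groups (signature, its keys in input order)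
-- in first-occurrence order
def pvGroups : List (List Int × List Int) → List (List Int × List (List Int))
  | [] => []
  | (key, sig) :: rest =>
      (sig, key :: (rest.filter (fun p => p.2 == sig)).map Prod.fst) :: pvGroups (rest.filter (fun p => p.2 != sig))
  termination_by l => l.length
  decreasing_by
    simpa using Nat.lt_succ_of_le (le_trans (List.length_filter_le _ _) (le_of_eq List.length_attach))

-- the value Python's max(keys, key=len) takes on a nonempty group ([] is a junk default, never produced below)
def pyMaxLen (ks : List (List Int)) : List Int :=
  match PySem.List.max? ks (fun k => k.length) with
  | some m => m
  | none => []

theorem pyMaxLen_mem {ks : List (List Int)} (h : ks ≠ []) : pyMaxLen ks ∈ ks := by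
  unfold pyMaxLen
  rcases hm : PySem.List.max? ks (fun k => k.length) with _ | m
  · exact absurd ((PySem.List.max?_eq_none_iff ks _).mp hm) h
  · exact PySem.List.max?_mem hm

-- max with key=len IS the running strict-max loop
theorem max?_foldl (t : List (List Int)) : ∀ k : List Int,
    PySem.List.max? (k :: t) (fun x => x.length) =
      some (t.foldl (fun b x => if b.length < x.length then x else b) k) := by
  induction t with
  | nil => intro k; rfl
  | cons x t ih =>
      intro k
      have h1 : PySem.List.max? (k :: x :: t) (fun y => y.length) =
          PySem.List.max? ((if k.length < x.length then x else k) :: t) (fun y => y.length) := by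
        unfold PySem.List.max?
        simp only [List.foldl_cons]
        split_ifs <;> rfl
      rw [h1, ih]
      simp only [List.foldl_cons]

theorem pyMaxLen_cons (k : List Int) (t : List (List Int)) :
    pyMaxLen (k :: t) = t.foldl (fun b x => if b.length < x.length then x else b) k := by
  unfold pyMaxLen; rw [max?_foldl]

-- every group is nonempty
theorem pvGroups_ne_nil : ∀ (l : List (List Int × List Int)), ∀ g ∈ pvGroups l, g.2 ≠ [] := by
  intro l
  induction l using pvGroups.induct with
  | case1 => intro g hg; simp [pvGroups] at hg
  | case2 key sig rest ih =>
      simp only [List.unattach_filter, List.unattach_attach] at ih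
      intro g hg
      rw [pvGroups] at hg
      rcases List.mem_cons.mp hg with rfl | h
      · simp
      · exact ih g h

-- the groups' keys are a permutation of the input keys
theorem pvGroups_flatMap_perm : ∀ (l : List (List Int × List Int)),
    ((pvGroups l).flatMap Prod.snd).Perm (l.map Prod.fst) := by
  intro l
  induction l using pvGroups.induct with
  | case1 => simp [pvGroups]
  | case2 key sig rest ih =>
      simp only [List.unattach_filter, List.unattach_attach] at ih
      rw [pvGroups]
      simp only [List.flatMap_cons, List.map_cons, List.cons_append]
      refine List.Perm.cons key ?_
      refine List.Perm.trans (List.Perm.append_left _ ih) ?_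
      have h1 := (List.filter_append_perm (fun p => p.2 == sig) rest).map Prod.fst
      rw [List.map_append] at h1
      simpa [bne] using h1

-- B's inner scan over ALL remaining items equals the strict-max loop over the group's keys
theorem foldl_scan_filter (sig : List Int) : ∀ (rest : List (List Int × List Int)) (k : List Int),
    rest.foldl (fun b p => if p.2 == sig && b.length < p.1.length then p.1 else b) k =
      ((rest.filter (fun p => p.2 == sig)).map Prod.fst).foldl
        (fun b x => if b.length < x.length then x else b) k := by
  intro rest
  induction rest with
  | nil => intro k; rfl
  | cons p t ih =>
      intro k
      by_cases hp : (p.2 == sig) = true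
      · simp only [List.foldl_cons, List.filter_cons, hp, Bool.true_and, if_true, List.map_cons, decide_eq_true_eq]
        exact ih _
      · rw [Bool.not_eq_true] at hp
        simp only [List.foldl_cons, List.filter_cons, hp, Bool.false_and, Bool.false_eq_true, if_false]
        exact ih k

-- B's recursion computes exactly: for each group, the longest key (first among ties), with its signature
theorem collapse_eq_groups : ∀ (l : List (List Int × List Int)),
    pvCollapseRec l = (pvGroups l).map (fun g => (pyMaxLen g.2, g.1)) := by
  intro l
  induction l using pvCollapseRec.induct with
  | case1 => simp [pvCollapseRec, pvGroups]
  | case2 key sig rest ih =>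
      simp only [List.unattach_filter, List.unattach_attach] at ih
      rw [pvCollapseRec, pvGroups]
      simp only [List.map_cons]
      rw [ih, pyMaxLen_cons, foldl_scan_filter]

-- mapping an update-at-key function over an association list without that key changes nothing
theorem map_if_id {ν : Type} (l : List (List Int × ν)) (sig : List Int) (v : ν)
    (h : sig ∉ l.map Prod.fst) :
    l.map (fun p => if p.1 == sig then (sig, v) else p) = l := by
  induction l with
  | nil => rfl
  | cons p t ih =>
      simp only [List.mem_cons, not_or, List.map] at h ⊢
      have h1 : (p.1 == sig) = false := by
        simp only [beq_eq_false_iff_ne]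
        intro he; exact h.1 (by simp [← he])
      rw [h1]
      simp only [Bool.false_eq_true, if_false]
      rw [ih h.2]

-- a key occurring in a Nodup-keyed association list splits it with the key nowhere else
theorem assoc_decomp {ν : Type} {l : List (List Int × ν)} {sig : List Int} {w : ν}
    (hmem : (sig, w) ∈ l) (hnd : (l.map Prod.fst).Nodup) :
    ∃ l1 l2, l = l1 ++ (sig, w) :: l2 ∧ sig ∉ l1.map Prod.fst ∧ sig ∉ l2.map Prod.fst := by
  obtain ⟨l1, l2, rfl⟩ := List.append_of_mem hmem
  refine ⟨l1, l2, rfl, ?_, ?_⟩ <;>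
  · simp only [List.map_append, List.map_cons, List.nodup_append, List.nodup_cons] at hnd
    tauto

theorem nodup_map_of_flatMap {α β : Type} [DecidableEq β] (l : List α) (f : α → List β) (g : α → β)
    (h : (l.flatMap f).Nodup) (hg : ∀ x ∈ l, g x ∈ f x) : (l.map g).Nodup := by
  induction l with
  | nil => exact List.nodup_nil
  | cons a t ih =>
      rw [List.flatMap_cons, List.nodup_append] at h
      obtain ⟨h1, h2, hdis⟩ := h
      rw [List.map_cons, List.nodup_cons]
      refine ⟨?_, ih h2 (fun x hx => hg x (List.mem_cons_of_mem a hx))⟩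
      intro hga
      obtain ⟨x, hx, hgx⟩ := List.mem_map.mp hga
      have : g a ∈ t.flatMap f := by
        rw [List.mem_flatMap]
        exact ⟨x, hx, by rw [← hgx] at hga ⊢; exact hg x (List.mem_cons_of_mem a hx)⟩
      exact hdis _ (hg a List.mem_cons_self) _ this rfl

-- A's step-2 grouping fold, characterised against the recursive partition pvGroups
theorem grp_inv : ∀ (l : List (List Int × List Int)) (d : PySem.Dict (List Int) (List (List Int))),
    d.keys.Nodup →
    (l.foldl (fun d kv =>
        if d.contains kv.2 then d.modify kv.2 [] (fun ks => ks ++ [kv.1])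
        else d.insert kv.2 [kv.1]) d).items =
      d.items.map (fun g => (g.1, g.2 ++ ((l.filter (fun p => p.2 == g.1)).map Prod.fst)))
        ++ pvGroups (l.filter (fun p => !d.contains p.2)) := by
  intro l
  induction l with
  | nil =>
      intro d _
      simp only [List.foldl_nil, List.filter_nil]
      rw [pvGroups]
      simp
  | cons kv t ih =>
      obtain ⟨kk, ks⟩ := kv
      intro d hnd
      simp only [List.foldl_cons]
      by_cases hc : d.contains ks = true
      · -- the signature already has a group: append the key to it
        have hmemk : ks ∈ d.keys := by
          rw [PySem.Dict.contains_eq_decide_mem_keys] at hc; exact of_decide_eq_true hc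
        obtain ⟨p, hp, hp1⟩ := List.mem_map.mp hmemk
        obtain ⟨w, hw⟩ : ∃ w, (ks, w) ∈ d.items := ⟨p.2, by rwa [show ((ks : List Int), p.2) = p by rw [← hp1]]⟩
        obtain ⟨l1, l2, hdec, hs1, hs2⟩ := assoc_decomp hw hnd
        have hgD : d.getD ks [] = w := PySem.Dict.getD_of_mem_items d hw hnd []
        have hstepA : (if d.contains ks then d.modify ks [] (fun ks => ks ++ [kk])
            else d.insert ks [kk]) = d.insert ks (w ++ [kk]) := by
          rw [if_pos hc]
          show d.insert ks (d.getD ks [] ++ [kk]) = _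
          rw [hgD]
        have hitems' : (d.insert ks (w ++ [kk])).items = l1 ++ (ks, w ++ [kk]) :: l2 := by
          rw [PySem.Dict.items_insert_of_contains d _ hc, hdec]
          simp only [List.map_append, List.map_cons, beq_self_eq_true, if_true]
          rw [map_if_id l1 _ _ hs1, map_if_id l2 _ _ hs2]
        have hkeys' : (d.insert ks (w ++ [kk])).keys = d.keys := by
          show (d.insert ks (w ++ [kk])).items.map Prod.fst = d.items.map Prod.fst
          rw [hitems', hdec]; simp
        have hnd' : (d.insert ks (w ++ [kk])).keys.Nodup := by rw [hkeys']; exact hnd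
        have hcont' : ∀ x : List Int, (d.insert ks (w ++ [kk])).contains x = d.contains x := by
          intro x
          rw [PySem.Dict.contains_eq_decide_mem_keys, PySem.Dict.contains_eq_decide_mem_keys, hkeys']
        rw [hstepA, ih _ hnd']
        congr 1
        · -- the mapped part agrees
          rw [hitems', hdec]
          simp only [List.map_append, List.map_cons]
          congr 1
          · apply List.map_congr_left
            intro g hg
            have hne : (ks == g.1) = false := by
              simp only [beq_eq_false_iff_ne]
              intro he
              exact hs1 (he ▸ List.mem_map_of_mem hg)
            simp only [List.filter_cons, hne, Bool.false_eq_true, if_false]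
          · congr 1
            · simp only [List.filter_cons, beq_self_eq_true, if_true, List.map_cons]
              simp [List.append_assoc]
            · apply List.map_congr_left
              intro g hg
              have hne : (ks == g.1) = false := by
                simp only [beq_eq_false_iff_ne]
                intro he
                exact hs2 (he ▸ List.mem_map_of_mem hg)
              simp only [List.filter_cons, hne, Bool.false_eq_true, if_false]
        · -- the pvGroups part agrees
          have hfl : (t.filter (fun p => !(d.insert ks (w ++ [kk])).contains p.2)) =
              t.filter (fun p => !d.contains p.2) := by
            apply List.filter_congr
            intro x _
            rw [hcont' x.2]
          rw [hfl]
          simp only [List.filter_cons, hc, Bool.not_true, Bool.false_eq_true, if_false]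
      · -- a fresh signature: open a new group for it
        have hc' : d.contains ks = false := by simpa using hc
        have hnm : ks ∉ d.keys := by
          rw [PySem.Dict.contains_eq_decide_mem_keys] at hc'; exact of_decide_eq_false hc'
        rw [if_neg hc]
        have hitems' : (d.insert ks [kk]).items = d.items ++ [(ks, [kk])] :=
          PySem.Dict.items_insert_of_not_contains d _ hc'
        have hkeys' : (d.insert ks [kk]).keys = d.keys ++ [ks] := by
          show (d.insert ks [kk]).items.map Prod.fst = _
          rw [hitems']; simp; rfl
        have hnd' : (d.insert ks [kk]).keys.Nodup := by
          rw [hkeys', List.nodup_append]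
          exact ⟨hnd, List.nodup_singleton _, by
            intro a ha b hb
            rw [List.mem_singleton] at hb
            subst hb
            intro he; subst he; exact hnm ha⟩
        have hcont' : ∀ x : List Int, (d.insert ks [kk]).contains x =
            (d.contains x || (x == ks)) := by
          intro x
          rw [PySem.Dict.contains_eq_decide_mem_keys, PySem.Dict.contains_eq_decide_mem_keys, hkeys']
          by_cases hx : x = ks
          · subst hx; simp
          · simp [hx, List.mem_append]
        rw [ih _ hnd']
        -- head of the cons-filter on the right passes (ks is fresh)
        have hhead : (((kk, ks) :: t).filter (fun p => !d.contains p.2)) =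
            (kk, ks) :: t.filter (fun p => !d.contains p.2) := by
          simp [List.filter_cons, hc']
        rw [hhead, pvGroups]
        have hf1 : ((t.filter (fun p => !d.contains p.2)).filter (fun p => p.2 == ks)) =
            t.filter (fun p => p.2 == ks) := by
          rw [List.filter_filter]
          apply List.filter_congr
          intro x _
          by_cases hx : (x.2 == ks) = true
          · have : d.contains x.2 = false := by
              rw [show x.2 = ks from eq_of_beq hx]; exact hc'
            simp [hx, this]
          · rw [Bool.not_eq_true] at hx; simp [hx]
        have hf2 : (t.filter (fun p => !(d.insert ks [kk]).contains p.2)) =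
            ((t.filter (fun p => !d.contains p.2)).filter (fun p => p.2 != ks)) := by
          rw [List.filter_filter]
          apply List.filter_congr
          intro x _
          rw [hcont' x.2]
          simp only [Bool.not_or, bne]
          rw [Bool.and_comm]
        rw [hitems', hf2]
        simp only [List.map_append, List.map_cons, List.map_nil]
        rw [List.append_assoc]
        congr 1
        · -- existing groups see no new key (ks differs from every present signature)
          apply List.map_congr_left
          intro g hg
          have hne : (ks == g.1) = false := by
            simp only [beq_eq_false_iff_ne]
            intro he
            exact hnm (he ▸ List.mem_map_of_mem hg)
          simp only [List.filter_cons, hne, Bool.false_eq_true, if_false]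
        · -- the new singleton group picks up kk and the later keys of its signature
          simp only [List.nil_append, List.singleton_append, List.filter_cons,
            beq_self_eq_true, if_true, List.map_cons, hf1]

theorem ports_eq (input : List (List Int × List Int))
    (hknd : (input.map Prod.fst).Nodup) :
    csb_collapse_to_longest_pattern input = csb_collapse_to_longest_pattern_alt input := by
  simp only [csb_collapse_to_longest_pattern, csb_collapse_to_longest_pattern_alt]
  -- the processed association list produced by A's step 1
  have h1 : (input.foldl (fun d kv => d.insert kv.1 (PySem.List.sorted kv.2 (fun x => x) false))
      PySem.Dict.empty).items =
      input.map (fun kv => (kv.1, PySem.List.sorted kv.2 (fun x => x) false)) := by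
    rw [PySem.Dict.items_foldl_insert_fresh input Prod.fst
      (fun kv => PySem.List.sorted kv.2 (fun x => x) false) PySem.Dict.empty
      (fun a _ => PySem.Dict.contains_empty _) hknd]
    rfl
  rw [h1]
  generalize hP : input.map (fun kv => (kv.1, PySem.List.sorted kv.2 (fun x => x) false)) = P at *
  have hPknd : (P.map Prod.fst).Nodup := by rw [← hP, List.map_map]; exact hknd
  -- A's step-2 grouping dict is exactly pvGroups P
  have h2 : (P.foldl (fun d kv =>
        if d.contains kv.2 then d.modify kv.2 [] (fun ks => ks ++ [kv.1])
        else d.insert kv.2 [kv.1]) PySem.Dict.empty).items = pvGroups P := by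
    rw [grp_inv P PySem.Dict.empty (by exact List.nodup_nil)]
    have : (P.filter (fun p => !(PySem.Dict.empty : PySem.Dict (List Int) (List (List Int))).contains p.2)) = P := by
      apply List.filter_eq_self.mpr
      intro x _
      simp [PySem.Dict.contains_empty]
    rw [this]
    rfl
  rw [h2]
  -- facts about the groups
  have hne : ∀ g ∈ pvGroups P, g.2 ≠ [] := pvGroups_ne_nil P
  have hflnd : ((pvGroups P).flatMap Prod.snd).Nodup :=
    ((pvGroups_flatMap_perm P).nodup_iff).mpr hPknd
  have hmaxnd : ((pvGroups P).map (fun g => pyMaxLen g.2)).Nodup :=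
    nodup_map_of_flatMap (pvGroups P) Prod.snd _ hflnd (fun g hg => pyMaxLen_mem (hne g hg))
  -- A's step 3 on the grouped list: a fold of fresh inserts keyed by the longest key of each group
  have h3 : ((pvGroups P).foldl (fun f vks =>
        match PySem.List.max? vks.2 (fun k => k.length) with
        | some longest => f.insert longest vks.1
        | none => f) (PySem.Dict.empty : PySem.Dict (List Int) (List Int))).items =
      (pvGroups P).map (fun g => (pyMaxLen g.2, g.1)) := by
    rw [PySem.List.foldl_congr_mem (pvGroups P) _
      (fun f vks => f.insert (pyMaxLen vks.2) vks.1) _ ?_]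
    · rw [PySem.Dict.items_foldl_insert_fresh (pvGroups P) (fun g => pyMaxLen g.2) (fun g => g.1)
        PySem.Dict.empty (fun a _ => PySem.Dict.contains_empty _) hmaxnd]
      rfl
    · intro acc x hx
      rcases hm : PySem.List.max? x.2 (fun k => k.length) with _ | m
      · exact absurd ((PySem.List.max?_eq_none_iff x.2 _).mp hm) (hne x hx)
      · have hpm : pyMaxLen x.2 = m := by unfold pyMaxLen; rw [hm]
        show acc.insert m x.1 = acc.insert (pyMaxLen x.2) x.1
        rw [hpm]
  rw [h3]
  -- B's final dict comprehension over collapse(items): also fresh inserts, same list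
  have hB : pvCollapseRec P = (pvGroups P).map (fun g => (pyMaxLen g.2, g.1)) := collapse_eq_groups P
  have hBnd : ((pvCollapseRec P).map Prod.fst).Nodup := by
    rw [hB, List.map_map]
    exact hmaxnd
  have h4 : ((pvCollapseRec P).foldl (fun d p => d.insert p.1 p.2)
      (PySem.Dict.empty : PySem.Dict (List Int) (List Int))).items = pvCollapseRec P := by
    rw [PySem.Dict.items_foldl_insert_fresh (pvCollapseRec P) Prod.fst Prod.snd
      PySem.Dict.empty (fun a _ => PySem.Dict.contains_empty _) hBnd]
    have he : (PySem.Dict.empty : PySem.Dict (List Int) (List Int)).items = [] := rfl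
    simp [he]
  rw [h4, hB]

-- ===== VERDICT (by name: the statement is the Claim_ definition above) =====
theorem csb_collapse_to_longest_pattern_spec : Claim_equal_csb_collapse_to_longest_pattern := by
  intro input _hdom hpre
  exact ports_eq input hpre.1
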